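-- pv_equiv track=rewrite | github.com/renjieliu/personal_projects | googlecodejam/0. copy_from_google_jam_archive/2021/Round 1A 2021/2.py | func
-- ===== SOURCE A (Python) =====
-- def func(arr):
--     s = sum(arr)
--     def combo(output, arr, curr, n):
--         if len(curr) == n:
--             output.append(curr)
--         else:
--             for i in range(len(arr)):
--                 combo(output, arr[i+1:], curr+[arr[i]], n)
--     def prod(a):
--         output=1
--         for x in a:
--             output *= x
--         return output
--
--     output = []
--     for i in range(1, len(arr)):
--         combo(output, arr, [], i)
--     res = -float('inf')
--     for o in output:
--         if prod(o) == s - sum(o):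
--             res = max(res, s-sum(o))
--
--
--     return 0 if res == -float('inf') else res
-- ===== SOURCE B (Python) =====
-- def func(arr):
--     s = sum(arr)
--     n = len(arr)
--     # one doubling pass over (size, sum, prod) aggregates of every subset;
--     # no list-of-lists is ever materialized
--     subs = [(0, 0, 1)]
--     for x in arr:
--         subs += [(k + 1, t + x, p * x) for (k, t, p) in subs]
--     best = None
--     for (k, t, p) in subs:
--         if 0 < k < n and p == s - t:
--             v = s - t
--             if best is None or v > best:
--                 best = v
--     return 0 if best is None else best
-- ===== Notes on version B (the rewrite author's own statement) =====
-- stated objective: faster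
-- what changed: Instead of materializing every combination of every size via recursive combo calls and then re-summing and re-multiplying each list, B makes one powerset-doubling pass that maintains only (size, sum, product) aggregate triples per subset and takes the max on the fly.
import Mathlib
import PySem

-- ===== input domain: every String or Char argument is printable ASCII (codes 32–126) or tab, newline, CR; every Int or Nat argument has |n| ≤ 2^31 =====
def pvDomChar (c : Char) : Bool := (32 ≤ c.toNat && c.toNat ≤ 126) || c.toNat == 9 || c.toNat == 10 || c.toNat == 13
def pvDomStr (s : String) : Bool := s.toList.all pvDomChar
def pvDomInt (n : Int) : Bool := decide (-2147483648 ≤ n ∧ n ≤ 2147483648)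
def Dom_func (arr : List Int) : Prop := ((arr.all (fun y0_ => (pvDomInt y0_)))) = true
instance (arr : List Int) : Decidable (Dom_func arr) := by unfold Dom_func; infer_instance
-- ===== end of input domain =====

-- B replaces A's per-size recursive combination lists with a single powerset-doubling pass
-- over (size, sum, product) aggregate triples; equivalence of the return values is proved below.

-- ===== PORT A =====
-- prod helper of A
def pvProd (a : List Int) : Int := a.foldl (· * ·) 1

-- combo helper of A: the Python loop `for i in range(len(arr)): combo(output, arr[i+1:], curr+[arr[i]], n)`
-- is transcribed as the structural recursion `combo rest (curr++[x]) n ++ <same loop on rest>`;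
-- the second summand re-enters pvCombo, whose length test is false there exactly as in Python.
def pvCombo (arr curr : List Int) (n : Nat) : List (List Int) :=
  if curr.length = n then [curr]
  else
    match arr with
    | [] => []
    | x :: rest => pvCombo rest (curr ++ [x]) n ++ pvCombo rest curr n

def func (arr : List Int) : Int :=
  let s := arr.sum
  let output := (List.range' 1 (arr.length - 1)).foldl (fun out i => out ++ pvCombo arr [] i) []
  let res := output.foldl
    (fun (r : Option Int) o =>
      if pvProd o = s - o.sum then
        some (match r with | none => s - o.sum | some u => max u (s - o.sum))
      else r) none
  match res with
  | none => 0
  | some v => v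

-- ===== PORT B =====
def func_alt (arr : List Int) : Int :=
  let s := arr.sum
  let n := arr.length
  let subs := arr.foldl
    (fun acc x => acc ++ acc.map (fun ktp : Int × Int × Int => (ktp.1 + 1, ktp.2.1 + x, ktp.2.2 * x)))
    [((0 : Int), (0 : Int), (1 : Int))]
  let best := subs.foldl
    (fun (r : Option Int) ktp =>
      if (0:Int) < ktp.1 ∧ ktp.1 < (n : Int) ∧ ktp.2.2 = s - ktp.2.1 then
        match r with
        | none => some (s - ktp.2.1)
        | some u => if s - ktp.2.1 > u then some (s - ktp.2.1) else some u
      else r) none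
  match best with
  | none => 0
  | some v => v

-- ===== PRECONDITION & SPEC =====
def Spec_func (arr : List Int) (out : Int) : Prop := out = func_alt arr
instance (arr : List Int) (out : Int) : Decidable (Spec_func arr out) := by unfold Spec_func; infer_instance

-- ===== CLAIM (what is proved, stated in full; the proofs are below) =====
def Claim_equal_func : Prop := ∀ (arr : List Int), Dom_func arr → Spec_func arr (func arr)

-- ===== LEMMAS AND PROOFS =====

-- the "running maximum with None start" operation both loops perform
def pvOp (r : Option Int) (v : Int) : Option Int :=
  some (match r with | none => v | some u => max u v)

-- the aggregate triple of a subset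
def pvKappa (o : List Int) : Int × Int × Int := ((o.length : Int), o.sum, pvProd o)

-- the list-of-subsets mirror of B's doubling pass
def pvPow (arr : List Int) : List (List Int) :=
  arr.foldl (fun acc x => acc ++ acc.map (· ++ [x])) [[]]

theorem pvOp_rcomm (r : Option Int) (a b : Int) : pvOp (pvOp r a) b = pvOp (pvOp r b) a := by
  cases r <;> simp [pvOp, max_assoc, max_comm a b]

theorem pvFoldl_perm {L1 L2 : List Int} (h : L1.Perm L2) (r : Option Int) :
    L1.foldl pvOp r = L2.foldl pvOp r :=
  h.foldl_eq' (fun x _ y _ z => pvOp_rcomm z x y) r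

-- A's result loop = fold of pvOp over the values of the passing subsets
theorem pvFoldA (s : Int) (L : List (List Int)) (r : Option Int) :
    L.foldl
      (fun (r : Option Int) o =>
        if pvProd o = s - o.sum then
          some (match r with | none => s - o.sum | some u => max u (s - o.sum))
        else r) r
    = ((L.filter (fun o => decide (pvProd o = s - o.sum))).map (fun o => s - o.sum)).foldl pvOp r := by
  induction L generalizing r with
  | nil => rfl
  | cons o L ih =>
      by_cases h : pvProd o = s - o.sum <;>
        simp [h, ih, pvOp]

-- B's result loop likewise
theorem pvFoldB (s nI : Int) (L : List (Int × Int × Int)) (r : Option Int) :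
    L.foldl
      (fun (r : Option Int) ktp =>
        if (0:Int) < ktp.1 ∧ ktp.1 < nI ∧ ktp.2.2 = s - ktp.2.1 then
          match r with
          | none => some (s - ktp.2.1)
          | some u => if s - ktp.2.1 > u then some (s - ktp.2.1) else some u
        else r) r
    = ((L.filter (fun ktp => decide ((0:Int) < ktp.1 ∧ ktp.1 < nI ∧ ktp.2.2 = s - ktp.2.1))).map
        (fun ktp => s - ktp.2.1)).foldl pvOp r := by
  induction L generalizing r with
  | nil => rfl
  | cons k L ih =>
      by_cases h : (0:Int) < k.1 ∧ k.1 < nI ∧ k.2.2 = s - k.2.1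
      · have hstep : (match r with
            | none => some (s - k.2.1)
            | some u => if s - k.2.1 > u then some (s - k.2.1) else some u) = pvOp r (s - k.2.1) := by
          cases r with
          | none => rfl
          | some u =>
              by_cases hu : s - k.2.1 > u
              · simp [pvOp, hu, max_eq_right (le_of_lt hu)]
              · simp [pvOp, hu, max_eq_left (not_lt.mp hu)]
        simp [h, ih, hstep]
      · simp [h, ih]

-- combo generates exactly the length-(n - |curr|) sublists, each prefixed by curr (up to order)
theorem pvCombo_perm (arr : List Int) : ∀ (curr : List Int) (n : Nat), curr.length ≤ n →
    (pvCombo arr curr n).Perm ((List.sublistsLen (n - curr.length) arr).map (curr ++ ·)) := by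
  induction arr with
  | nil =>
      intro curr n hle
      by_cases h : curr.length = n
      · simp [pvCombo, h]
      · obtain ⟨m, hm⟩ : ∃ m, n - curr.length = m + 1 := ⟨n - curr.length - 1, by omega⟩
        simp [pvCombo, h, hm]
  | cons x rest ih =>
      intro curr n hle
      by_cases h : curr.length = n
      · simp [pvCombo, h]
      · have hlt : curr.length < n := lt_of_le_of_ne hle h
        obtain ⟨m, hm⟩ : ∃ m, n - curr.length = m + 1 := ⟨n - curr.length - 1, by omega⟩
        have h1 := ih (curr ++ [x]) n (by simp; omega)
        have h2 := ih curr n hle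
        have hm' : n - (curr ++ [x]).length = m := by simp; omega
        rw [hm'] at h1
        rw [hm] at h2
        rw [pvCombo, if_neg h, hm, List.sublistsLen_succ_cons, List.map_append, List.map_map]
        have hcomp : ((curr ++ ·) ∘ (x :: ·)) = ((curr ++ [x]) ++ ·) := by
          funext o; simp
        rw [hcomp]
        exact (h1.append h2).trans (List.perm_append_comm)

-- B's triple list is the image under pvKappa of the powerset-doubling list
theorem pvKappa_append (o : List Int) (x : Int) :
    pvKappa (o ++ [x]) = ((pvKappa o).1 + 1, (pvKappa o).2.1 + x, (pvKappa o).2.2 * x) := by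
  simp [pvKappa, pvProd, List.foldl_append]

theorem pvSubs_eq (arr : List Int) :
    arr.foldl
      (fun acc x => acc ++ acc.map (fun ktp : Int × Int × Int => (ktp.1 + 1, ktp.2.1 + x, ktp.2.2 * x)))
      [((0 : Int), (0 : Int), (1 : Int))]
    = (pvPow arr).map pvKappa := by
  have key : ∀ (l : List Int) (accL : List (List Int)),
      l.foldl
        (fun (acc : List (Int × Int × Int)) x => acc ++ acc.map (fun ktp => (ktp.1 + 1, ktp.2.1 + x, ktp.2.2 * x)))
        (accL.map pvKappa)
      = (l.foldl (fun (acc : List (List Int)) x => acc ++ acc.map (· ++ [x])) accL).map pvKappa := by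
    intro l
    induction l with
    | nil => intro accL; rfl
    | cons x rest ih =>
        intro accL
        have : (accL.map pvKappa) ++ (accL.map pvKappa).map
              (fun ktp : Int × Int × Int => (ktp.1 + 1, ktp.2.1 + x, ktp.2.2 * x))
            = (accL ++ accL.map (· ++ [x])).map pvKappa := by
          simp [List.map_map]
          intro o _
          exact (pvKappa_append o x).symm
        simp only [List.foldl_cons, this, ih]
  have h0 : [((0 : Int), (0 : Int), (1 : Int))] = ([[]] : List (List Int)).map pvKappa := rfl
  rw [pvPow, h0, key]

-- the doubling pass builds exactly Mathlib's sublists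
theorem pvPow_eq_sublists (arr : List Int) : pvPow arr = arr.sublists := by
  induction arr using List.reverseRecOn with
  | nil => rfl
  | append_singleton l x ih =>
      rw [pvPow, List.foldl_append, List.foldl_cons, List.foldl_nil, ← pvPow, ih,
        List.sublists_concat]

-- A's accumulated output (as a flat list)
theorem pvOutput_eq (arr : List Int) :
    (List.range' 1 (arr.length - 1)).foldl (fun out i => out ++ pvCombo arr [] i) []
    = (List.range' 1 (arr.length - 1)).flatMap (fun i => pvCombo arr [] i) := by
  have : ∀ (l : List Nat) (init : List (List Int)),
      l.foldl (fun out i => out ++ pvCombo arr [] i) init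
      = init ++ l.flatMap (fun i => pvCombo arr [] i) := by
    intro l
    induction l with
    | nil => simp
    | cons i l ih => intro init; simp [ih, List.flatMap_cons]
  simpa using this _ []

theorem pvOutput_perm (arr : List Int) :
    ((List.range' 1 (arr.length - 1)).flatMap (fun i => pvCombo arr [] i)).Perm
      ((List.range' 1 (arr.length - 1)).flatMap (fun i => List.sublistsLen i arr)) := by
  rw [List.flatMap_def, List.flatMap_def]
  apply List.Perm.flatten_congr
  rw [List.forall₂_map_right_iff, List.forall₂_map_left_iff]
  exact List.forall₂_same.mpr (fun i _ => by
    simpa using pvCombo_perm arr [] i (by simp))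

-- main perm: the proper nonempty sublists as A enumerates them vs the full sublists' list
theorem pvMain_perm (x : Int) (rest : List Int) :
    ([([] : List Int)] ++
      ((List.range' 1 ((x :: rest).length - 1)).flatMap (fun i => List.sublistsLen i (x :: rest)))
      ++ [x :: rest]).Perm ((x :: rest).sublists') := by
  have hn : (x :: rest).length - 1 + 1 = (x :: rest).length := by simp
  have hrange : List.range ((x :: rest).length + 1)
      = 0 :: (List.range' 1 ((x :: rest).length - 1) ++ [(x :: rest).length]) := by
    rw [List.range_eq_range',
      show (x :: rest).length + 1 = (((x :: rest).length - 1) + 1) + 1 by omega,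
      List.range'_succ, List.range'_1_concat]
    simp [Nat.add_comm]
  have := List.range_bind_sublistsLen_perm (x :: rest)
  rw [hrange] at this
  simpa [List.flatMap_cons, List.flatMap_append, List.sublistsLen_length,
    List.sublistsLen_of_length_lt (by omega : rest.length < rest.length + 1)] using this

-- ===== VERDICT (by name: the statement is the Claim_ definition above) =====
theorem func_spec : Claim_equal_func := by
  intro arr _
  unfold Spec_func
  cases arr with
  | nil => rfl
  | cons x rest =>
    set a := x :: rest with ha
    show func a = func_alt a
    simp only [func, func_alt]
    rw [pvFoldA, pvFoldB, pvSubs_eq, pvPow_eq_sublists, pvOutput_eq]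
    set s := a.sum
    set n := a.length with hn
    set M := (List.range' 1 (n - 1)).flatMap (fun i => List.sublistsLen i a) with hM
    -- length of every element of M is strictly between 0 and n
    have hMlen : ∀ o ∈ M, 0 < o.length ∧ o.length < n := by
      intro o ho
      rw [hM] at ho
      simp only [List.mem_flatMap] at ho
      obtain ⟨i, hi, hoi⟩ := ho
      have := (List.mem_sublistsLen.mp hoi).2
      have hi' := List.mem_range'_1.mp hi
      omega
    -- B's filtered triples = image of A's passing subsets of M
    have hB : (a.sublists.map pvKappa).filter
          (fun ktp => decide ((0:Int) < ktp.1 ∧ ktp.1 < (n : Int) ∧ ktp.2.2 = s - ktp.2.1))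
        |>.map (fun ktp => s - ktp.2.1)
        |>.Perm ((M.filter (fun o => decide (pvProd o = s - o.sum))).map (fun o => s - o.sum)) := by
      have hperm : (a.sublists.map pvKappa).Perm
          (([([] : List Int)] ++ M ++ [a]).map pvKappa) :=
        ((List.sublists_perm_sublists' a).trans (pvMain_perm x rest).symm).map pvKappa
      refine ((hperm.filter _).map _).trans ?_
      have hfilter : (([([] : List Int)] ++ M ++ [a]).map pvKappa).filter
            (fun ktp => decide ((0:Int) < ktp.1 ∧ ktp.1 < (n : Int) ∧ ktp.2.2 = s - ktp.2.1))
          = (M.filter (fun o => decide (pvProd o = s - o.sum))).map pvKappa := by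
        rw [List.filter_map, List.filter_append, List.filter_append]
        have hnil : ([([] : List Int)]).filter
            ((fun ktp : Int × Int × Int => decide ((0:Int) < ktp.1 ∧ ktp.1 < (n : Int) ∧ ktp.2.2 = s - ktp.2.1)) ∘ pvKappa) = [] := by
          simp [pvKappa]
        have hfull : ([a]).filter
            ((fun ktp : Int × Int × Int => decide ((0:Int) < ktp.1 ∧ ktp.1 < (n : Int) ∧ ktp.2.2 = s - ktp.2.1)) ∘ pvKappa) = [] := by
          simp [pvKappa, hn]
        rw [hnil, hfull, List.nil_append, List.append_nil]
        congr 1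
        apply List.filter_congr
        intro o ho
        have := hMlen o ho
        simp only [Function.comp, pvKappa, decide_eq_decide]
        constructor
        · rintro ⟨-, -, h3⟩; exact h3
        · intro h; exact ⟨by exact_mod_cast this.1, by exact_mod_cast this.2, h⟩
      rw [hfilter, List.map_map]
      exact List.Perm.of_eq (List.map_congr_left (fun o _ => rfl))
    -- A's passing values ~ the same list
    have hA : (((List.range' 1 (n - 1)).flatMap (fun i => pvCombo a [] i)).filter
          (fun o => decide (pvProd o = s - o.sum))).map (fun o => s - o.sum)
        |>.Perm ((M.filter (fun o => decide (pvProd o = s - o.sum))).map (fun o => s - o.sum)) :=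
      (((pvOutput_perm a).filter _).map _)
    rw [pvFoldl_perm (hA.trans hB.symm) none]
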